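-- pv_equiv track=rewrite | github.com/gabriel-leone/pdf-qa-system | services/text_chunker.py | _find_word_boundary
-- ===== SOURCE A (Python) =====
-- def _find_word_boundary(text: str, approx_pos: int) -> int:
--     """Find word boundary near the approximate position."""
--     if approx_pos >= len(text):
--         return len(text)
--
--     # Look for whitespace around the position
--     for offset in range(50):  # Search within 50 characters
--         # Try forward
--         if approx_pos + offset < len(text) and text[approx_pos + offset].isspace():
--             return approx_pos + offset
--
--         # Try backward
--         if approx_pos - offset > 0 and text[approx_pos - offset].isspace():
--             return approx_pos - offset
--
--     # If no whitespace found, use the approximate position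
--     return approx_pos
-- ===== SOURCE B (Python) =====
-- def _find_word_boundary(text: str, approx_pos: int) -> int:
--     """Find word boundary near the approximate position."""
--     if approx_pos >= len(text):
--         return len(text)
--
--     # Smallest forward / backward whitespace offsets within 50, found independently.
--     fwd = next((f for f in range(50)
--                 if approx_pos + f < len(text) and text[approx_pos + f].isspace()), None)
--     bwd = next((b for b in range(50)
--                 if approx_pos - b > 0 and text[approx_pos - b].isspace()), None)
--
--     if fwd is not None and (bwd is None or fwd <= bwd):
--         return approx_pos + fwd
--     if bwd is not None:
--         return approx_pos - bwd
--     return approx_pos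
-- ===== Notes on version B (the rewrite author's own statement) =====
-- stated objective: alternative
-- what changed: A interleaves the forward and backward probes inside one 50-step loop with early returns; B runs two independent bounded scans that each find the nearest whitespace offset in their direction and then combines the two candidates with a forward-wins-on-tie comparison.
import Mathlib
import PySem

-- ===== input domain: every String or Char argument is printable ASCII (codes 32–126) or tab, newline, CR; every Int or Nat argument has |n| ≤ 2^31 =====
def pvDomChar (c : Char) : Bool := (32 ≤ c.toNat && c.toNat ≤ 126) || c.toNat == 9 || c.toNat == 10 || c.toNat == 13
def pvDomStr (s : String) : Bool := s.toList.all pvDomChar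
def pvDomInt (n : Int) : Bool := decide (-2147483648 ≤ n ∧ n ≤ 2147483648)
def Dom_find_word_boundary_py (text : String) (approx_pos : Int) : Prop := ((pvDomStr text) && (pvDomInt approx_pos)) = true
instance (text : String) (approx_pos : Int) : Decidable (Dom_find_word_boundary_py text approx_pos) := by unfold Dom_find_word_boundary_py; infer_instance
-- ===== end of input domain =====

-- ===== PORT A =====
-- One honest line: B replaces A's interleaved forward/backward probe loop by two
-- independent bounded scans combined with a forward-wins-on-tie comparison (alternative decomposition).
-- A's loop `for offset in range(50)` with its two early returns; indexing via PySem.Str.pyGet?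
-- (exact; the `.getD false` default is only reached where Python A raises IndexError, outside Pre_).
def fwbA_loop (text : String) (approx_pos : Int) : List Int → Int
  | [] => approx_pos
  | offset :: rest =>
    if decide (approx_pos + offset < PySem.Str.len text) &&
        ((PySem.Str.pyGet? text (approx_pos + offset)).map PySem.Chars.isspace).getD false then
      approx_pos + offset
    else if decide (0 < approx_pos - offset) &&
        ((PySem.Str.pyGet? text (approx_pos - offset)).map PySem.Chars.isspace).getD false then
      approx_pos - offset
    else fwbA_loop text approx_pos rest

def find_word_boundary_py (text : String) (approx_pos : Int) : Int :=
  if PySem.Str.len text ≤ approx_pos then PySem.Str.len text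
  else fwbA_loop text approx_pos (PySem.List.pyRange 0 50 1)

-- ===== PORT B =====
-- `next((o for o in range(50) if cond(o)), None)`: first element of the list satisfying cond.
def fwbB_first (cond : Int → Bool) : List Int → Option Int
  | [] => none
  | o :: rest => if cond o then some o else fwbB_first cond rest

def find_word_boundary_py_alt (text : String) (approx_pos : Int) : Int :=
  if PySem.Str.len text ≤ approx_pos then PySem.Str.len text
  else
    let fwd := fwbB_first (fun f => decide (approx_pos + f < PySem.Str.len text) &&
        ((PySem.Str.pyGet? text (approx_pos + f)).map PySem.Chars.isspace).getD false)
      (PySem.List.pyRange 0 50 1)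
    let bwd := fwbB_first (fun b => decide (0 < approx_pos - b) &&
        ((PySem.Str.pyGet? text (approx_pos - b)).map PySem.Chars.isspace).getD false)
      (PySem.List.pyRange 0 50 1)
    match fwd, bwd with
    | some f, some b => if f ≤ b then approx_pos + f else approx_pos - b
    | some f, none => approx_pos + f
    | none, some b => approx_pos - b
    | none, none => approx_pos

-- ===== PRECONDITION & SPEC =====
-- Pre_ excludes exactly the inputs where Python A raises IndexError
-- (a negative approx_pos below -len(text): text[approx_pos] is out of range); B raises there too.
def Pre_find_word_boundary_py (text : String) (approx_pos : Int) : Prop :=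
  -(PySem.Str.len text) ≤ approx_pos
instance (text : String) (approx_pos : Int) : Decidable (Pre_find_word_boundary_py text approx_pos) := by
  unfold Pre_find_word_boundary_py; infer_instance

def pvWitness_find_word_boundary_py : String × Int := ("hello world", 3)

def Spec_find_word_boundary_py (text : String) (approx_pos : Int) (out : Int) : Prop :=
  out = find_word_boundary_py_alt text approx_pos
instance (text : String) (approx_pos : Int) (out : Int) : Decidable (Spec_find_word_boundary_py text approx_pos out) := by
  unfold Spec_find_word_boundary_py; infer_instance

-- ===== CLAIM (what is proved, stated in full; the proofs are below) =====
def Claim_equal_find_word_boundary_py : Prop := ∀ (text : String) (approx_pos : Int), Dom_find_word_boundary_py text approx_pos → Pre_find_word_boundary_py text approx_pos → Spec_find_word_boundary_py text approx_pos (find_word_boundary_py text approx_pos)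

-- ===== LEMMAS AND PROOFS =====

-- how B combines its two scan results
def fwbCombine (a : Int) : Option Int → Option Int → Int
  | some f, some b => if f ≤ b then a + f else a - b
  | some f, none => a + f
  | none, some b => a - b
  | none, none => a

lemma fwbB_first_mem (c : Int → Bool) (l : List Int) (x : Int)
    (h : fwbB_first c l = some x) : x ∈ l := by
  induction l with
  | nil => simp [fwbB_first] at h
  | cons o rest ih =>
    by_cases hc : c o
    · simp [fwbB_first, hc] at h; simp [h]
    · simp [fwbB_first, hc] at h
      exact List.mem_cons_of_mem _ (ih h)

lemma fwbA_loop_eq (text : String) (a : Int) (l : List Int)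
    (hl : l.Pairwise (· < ·)) :
    fwbA_loop text a l =
      fwbCombine a
        (fwbB_first (fun f => decide (a + f < PySem.Str.len text) &&
            ((PySem.Str.pyGet? text (a + f)).map PySem.Chars.isspace).getD false) l)
        (fwbB_first (fun b => decide (0 < a - b) &&
            ((PySem.Str.pyGet? text (a - b)).map PySem.Chars.isspace).getD false) l) := by
  induction l with
  | nil => simp [fwbA_loop, fwbB_first, fwbCombine]
  | cons o rest ih =>
    rcases List.pairwise_cons.mp hl with ⟨ho, hrest⟩
    by_cases hF : (decide (a + o < PySem.Str.len text) &&
        ((PySem.Str.pyGet? text (a + o)).map PySem.Chars.isspace).getD false) = true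
    · simp only [fwbA_loop, fwbB_first]
      rw [if_pos hF, if_pos hF]
      by_cases hB : (decide (0 < a - o) &&
          ((PySem.Str.pyGet? text (a - o)).map PySem.Chars.isspace).getD false) = true
      · rw [if_pos hB]; simp [fwbCombine]
      · rw [if_neg hB]
        rcases hb : fwbB_first (fun b => decide (0 < a - b) &&
            ((PySem.Str.pyGet? text (a - b)).map PySem.Chars.isspace).getD false) rest with _ | b
        · simp [fwbCombine]
        · have := ho _ (fwbB_first_mem _ _ _ hb)
          simp [fwbCombine, le_of_lt this]
    · by_cases hB : (decide (0 < a - o) &&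
          ((PySem.Str.pyGet? text (a - o)).map PySem.Chars.isspace).getD false) = true
      · simp only [fwbA_loop, fwbB_first]
        rw [if_neg hF, if_pos hB, if_neg hF, if_pos hB]
        rcases hf : fwbB_first (fun f => decide (a + f < PySem.Str.len text) &&
            ((PySem.Str.pyGet? text (a + f)).map PySem.Chars.isspace).getD false) rest with _ | f
        · simp [fwbCombine]
        · have := ho _ (fwbB_first_mem _ _ _ hf)
          simp [fwbCombine, not_le.mpr this]
      · simp only [fwbA_loop, fwbB_first]
        rw [if_neg hF, if_neg hB, if_neg hF, if_neg hB]
        exact ih hrest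

-- ===== VERDICT (by name: the statement is the Claim_ definition above) =====
theorem find_word_boundary_py_spec : Claim_equal_find_word_boundary_py := by
  intro text approx_pos _ _
  unfold Spec_find_word_boundary_py find_word_boundary_py find_word_boundary_py_alt
  by_cases h : PySem.Str.len text ≤ approx_pos
  · rw [if_pos h, if_pos h]
  · simp only [h, if_false]
    rw [fwbA_loop_eq text approx_pos _ (PySem.List.pairwise_lt_pyRange_one 0 50)]
    rcases fwbB_first _ (PySem.List.pyRange 0 50 1) with _ | f <;>
      rcases fwbB_first _ (PySem.List.pyRange 0 50 1) with _ | b <;>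
      simp [fwbCombine]
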